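-- pv_equiv track=rewrite | github.com/mylestunglee/adventofcode2023 | day14.py | next_grid
-- ===== SOURCE A (Python) =====
-- def next_grid(grid, cube_positions, round_positions):
--     width = len(grid[0])
--     height = len(grid)
--
--     def cell(x, y):
--         if (x, y) in cube_positions:
--             return '#'
--         elif (x, y) in round_positions:
--             return 'O'
--         else:
--             return '.'
--
--     return tuple(tuple(cell(x, y) for x in range(width)) for y in range(height))
-- ===== SOURCE B (Python) =====
-- def next_grid(grid, cube_positions, round_positions):
--     width = len(grid[0])
--     height = len(grid)
--     rows = [['.'] * width for _ in range(height)]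
--     for x, y in round_positions:
--         if 0 <= x < width and 0 <= y < height:
--             rows[y][x] = 'O'
--     for x, y in cube_positions:
--         if 0 <= x < width and 0 <= y < height:
--             rows[y][x] = '#'
--     return tuple(tuple(row) for row in rows)
-- ===== Notes on version B (the rewrite author's own statement) =====
-- stated objective: faster
-- what changed: Instead of scanning every cell and testing membership in both position lists, B allocates a '.'-filled grid once and writes 'O' then '#' directly at the (bounds-checked) positions, cube last so overlaps become '#'.
import Mathlib
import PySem

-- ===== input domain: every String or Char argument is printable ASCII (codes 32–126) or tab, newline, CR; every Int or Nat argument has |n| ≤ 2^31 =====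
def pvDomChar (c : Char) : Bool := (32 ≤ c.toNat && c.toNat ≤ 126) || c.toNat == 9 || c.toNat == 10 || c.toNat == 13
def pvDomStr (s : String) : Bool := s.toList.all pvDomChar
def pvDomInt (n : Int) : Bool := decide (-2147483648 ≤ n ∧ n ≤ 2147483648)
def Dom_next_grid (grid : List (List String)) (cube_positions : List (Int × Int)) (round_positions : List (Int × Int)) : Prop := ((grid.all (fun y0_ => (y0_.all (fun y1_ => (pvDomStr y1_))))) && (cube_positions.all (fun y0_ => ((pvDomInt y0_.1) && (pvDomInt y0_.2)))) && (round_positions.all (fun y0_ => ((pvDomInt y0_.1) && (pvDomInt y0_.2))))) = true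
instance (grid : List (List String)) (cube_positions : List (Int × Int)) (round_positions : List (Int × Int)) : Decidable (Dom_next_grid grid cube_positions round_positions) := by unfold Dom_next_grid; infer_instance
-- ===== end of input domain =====

-- ===== PORT A =====
-- B replaces A's full-grid membership scan by direct writes into a '.'-filled grid (cube written last).
def next_grid (grid : List (List String)) (cube_positions : List (Int × Int)) (round_positions : List (Int × Int)) : List (List String) :=
  let width := (grid.headD []).length   -- len(grid[0]); grid = [] raises IndexError, excluded by Pre_
  let height := grid.length
  (List.range height).map (fun (y : Nat) =>
    (List.range width).map (fun (x : Nat) =>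
      if ((x : Int), (y : Int)) ∈ cube_positions then "#"
      else if ((x : Int), (y : Int)) ∈ round_positions then "O"
      else "."))

-- ===== PORT B =====
-- rows[y][x] = c, guarded by the bounds check (no-op out of bounds)
def ngWrite (c : String) (width height : Nat) (g : List (List String)) (p : Int × Int) : List (List String) :=
  if 0 ≤ p.1 ∧ p.1 < (width : Int) ∧ 0 ≤ p.2 ∧ p.2 < (height : Int) then
    g.modify p.2.toNat (fun row => row.set p.1.toNat c)
  else g

def next_grid_alt (grid : List (List String)) (cube_positions : List (Int × Int)) (round_positions : List (Int × Int)) : List (List String) :=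
  let width := (grid.headD []).length
  let height := grid.length
  let g0 := List.replicate height (List.replicate width ".")
  let g1 := round_positions.foldl (ngWrite "O" width height) g0
  cube_positions.foldl (ngWrite "#" width height) g1

-- ===== PRECONDITION & SPEC =====
-- Pre_ excludes only the empty grid, on which A (and B) raise IndexError at grid[0].
def Pre_next_grid (grid : List (List String)) (cube_positions : List (Int × Int)) (round_positions : List (Int × Int)) : Prop := grid ≠ []
instance (grid : List (List String)) (cube_positions : List (Int × Int)) (round_positions : List (Int × Int)) : Decidable (Pre_next_grid grid cube_positions round_positions) := by unfold Pre_next_grid; infer_instance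
def pvWitness_next_grid : List (List String) × (List (Int × Int)) × (List (Int × Int)) := ([[".", "."], [".", "."]], [((1 : Int), (0 : Int))], [((0 : Int), (1 : Int))])

def Spec_next_grid (grid : List (List String)) (cube_positions : List (Int × Int)) (round_positions : List (Int × Int)) (out : List (List String)) : Prop := out = next_grid_alt grid cube_positions round_positions
instance (grid : List (List String)) (cube_positions : List (Int × Int)) (round_positions : List (Int × Int)) (out : List (List String)) : Decidable (Spec_next_grid grid cube_positions round_positions out) := by unfold Spec_next_grid; infer_instance

-- ===== CLAIM (what is proved, stated in full; the proofs are below) =====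
def Claim_equal_next_grid : Prop := ∀ (grid : List (List String)) (cube_positions : List (Int × Int)) (round_positions : List (Int × Int)), Dom_next_grid grid cube_positions round_positions → Pre_next_grid grid cube_positions round_positions → Spec_next_grid grid cube_positions round_positions (next_grid grid cube_positions round_positions)

-- ===== LEMMAS AND PROOFS =====

/-- the cell read out of a grid-of-rows, as an option -/
def ngCell? (g : List (List String)) (y x : Nat) : Option String := g[y]?.bind (fun r => r[x]?)

/-- every present row has length `w` -/
def ngInv (w : Nat) (g : List (List String)) : Prop := ∀ (y : Nat) (r : List String), g[y]? = some r → r.length = w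

theorem ngWrite_length (c : String) (w h : Nat) (g : List (List String)) (p : Int × Int) :
    (ngWrite c w h g p).length = g.length := by
  unfold ngWrite; split <;> simp [List.length_modify]

theorem ngWrite_inv {w : Nat} (c : String) (h : Nat) {g : List (List String)} (p : Int × Int)
    (hI : ngInv w g) : ngInv w (ngWrite c w h g p) := by
  unfold ngWrite
  split
  · intro y r hr
    rw [List.getElem?_modify] at hr
    cases hg : g[y]? with
    | none => rw [hg] at hr; simp at hr
    | some r0 =>
      rw [hg] at hr; simp at hr
      have hlen := hI y r0 hg
      split at hr <;> simp [← hr, hlen]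
  · exact hI

theorem ngWrite_cell {w h x y : Nat} (c : String) {g : List (List String)} (p : Int × Int)
    (hx : x < w) (hy : y < h) (hI : ngInv w g) (hL : g.length = h) :
    ngCell? (ngWrite c w h g p) y x =
      if p = ((x : Int), (y : Int)) then some c else ngCell? g y x := by
  have hyg : y < g.length := by omega
  have hrow : g[y]? = some (g[y]'hyg) := List.getElem?_eq_getElem hyg
  have hlenrow : (g[y]'hyg).length = w := hI y _ hrow
  unfold ngWrite
  split
  · rename_i hb
    obtain ⟨hb1, hb2, hb3, hb4⟩ := hb
    unfold ngCell?
    rw [List.getElem?_modify, hrow]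
    simp only [Option.map_eq_map, Option.map_some, Option.bind_some]
    by_cases hyeq : p.2.toNat = y
    · rw [if_pos hyeq, List.getElem?_set]
      by_cases hxeq : p.1.toNat = x
      · have hpeq : p = ((x : Int), (y : Int)) := by
          rw [Prod.ext_iff]; constructor <;> simp <;> omega
        rw [if_pos hxeq, if_pos (by omega : p.1.toNat < (g[y]'hyg).length), if_pos hpeq]
      · have hpne : p ≠ ((x : Int), (y : Int)) := by
          intro hc; apply hxeq; rw [hc]; simp
        rw [if_neg hxeq, if_neg hpne]
    · have hpne : p ≠ ((x : Int), (y : Int)) := by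
        intro hc; apply hyeq; rw [hc]; simp
      rw [if_neg hyeq, if_neg hpne]
  · rename_i hb
    have hpne : p ≠ ((x : Int), (y : Int)) := by
      intro hc; apply hb; rw [hc]; simp; omega
    rw [if_neg hpne]

theorem ngFold_inv {w : Nat} (c : String) (h : Nat) (ps : List (Int × Int))
    {g : List (List String)} (hI : ngInv w g) :
    ngInv w (ps.foldl (ngWrite c w h) g) := by
  induction ps generalizing g with
  | nil => exact hI
  | cons p ps ih => exact ih (ngWrite_inv c h p hI)

theorem ngFold_length (c : String) (w h : Nat) (ps : List (Int × Int)) (g : List (List String)) :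
    (ps.foldl (ngWrite c w h) g).length = g.length := by
  induction ps generalizing g with
  | nil => rfl
  | cons p ps ih => rw [List.foldl_cons, ih, ngWrite_length]

theorem ngFold_cell {w h x y : Nat} (c : String) (ps : List (Int × Int))
    {g : List (List String)} (hx : x < w) (hy : y < h) (hI : ngInv w g) (hL : g.length = h) :
    ngCell? (ps.foldl (ngWrite c w h) g) y x =
      if ((x : Int), (y : Int)) ∈ ps then some c else ngCell? g y x := by
  induction ps generalizing g with
  | nil => simp
  | cons p ps ih =>
    rw [List.foldl_cons, ih (ngWrite_inv c h p hI) (by rw [ngWrite_length]; exact hL),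
        ngWrite_cell c p hx hy hI hL]
    by_cases hmem : ((x : Int), (y : Int)) ∈ ps <;>
      by_cases hp : p = ((x : Int), (y : Int)) <;>
        simp [hmem, hp, List.mem_cons, eq_comm]

theorem ngMain (cube round : List (Int × Int)) (w h : Nat) :
    cube.foldl (ngWrite "#" w h)
        (round.foldl (ngWrite "O" w h) (List.replicate h (List.replicate w "."))) =
      (List.range h).map (fun (y : Nat) =>
        (List.range w).map (fun (x : Nat) =>
          if ((x : Int), (y : Int)) ∈ cube then "#"
          else if ((x : Int), (y : Int)) ∈ round then "O"
          else ".")) := by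
  have hI0 : ngInv w (List.replicate h (List.replicate w ".")) := by
    intro y r hr
    rw [List.getElem?_replicate] at hr
    by_cases hy : y < h
    · rw [if_pos hy] at hr
      simp only [Option.some.injEq] at hr
      subst hr
      simp
    · rw [if_neg hy] at hr
      simp at hr
  have hL0 : (List.replicate h (List.replicate w ".")).length = h := by simp
  have hI1 := ngFold_inv (w := w) "O" h round hI0
  have hL1 : (round.foldl (ngWrite "O" w h) (List.replicate h (List.replicate w "."))).length = h := by
    rw [ngFold_length]; exact hL0
  have hIG := ngFold_inv (w := w) "#" h cube hI1
  have hLG : (cube.foldl (ngWrite "#" w h)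
      (round.foldl (ngWrite "O" w h) (List.replicate h (List.replicate w ".")))).length = h := by
    rw [ngFold_length]; exact hL1
  set G := cube.foldl (ngWrite "#" w h)
      (round.foldl (ngWrite "O" w h) (List.replicate h (List.replicate w "."))) with hG
  have hcell : ∀ x y : Nat, x < w → y < h →
      ngCell? G y x = some (if ((x : Int), (y : Int)) ∈ cube then "#"
        else if ((x : Int), (y : Int)) ∈ round then "O" else ".") := by
    intro x y hx hy
    rw [hG, ngFold_cell "#" cube hx hy hI1 hL1, ngFold_cell "O" round hx hy hI0 hL0]
    have hbase : ngCell? (List.replicate h (List.replicate w ".")) y x = some "." := by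
      simp [ngCell?, hx, hy]
    rw [hbase]
    split_ifs <;> rfl
  apply List.ext_getElem?
  intro y
  rw [List.getElem?_map]
  by_cases hy : y < h
  · rw [List.getElem?_range hy]
    have hyG : y < G.length := by omega
    obtain ⟨row, hrow⟩ : ∃ row, G[y]? = some row := ⟨G[y]'hyG, List.getElem?_eq_getElem hyG⟩
    have hlenrow : row.length = w := hIG y _ hrow
    rw [hrow]
    simp only [Option.map_some, Option.some.injEq]
    apply List.ext_getElem?
    intro x
    rw [List.getElem?_map]
    by_cases hx : x < w
    · rw [List.getElem?_range hx]
      have hc := hcell x y hx hy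
      simp only [ngCell?, hrow, Option.bind_some] at hc
      rw [hc]
      simp
    · have h1 : (List.range w)[x]? = none := List.getElem?_eq_none (by simpa using hx)
      have h2 : row[x]? = none := List.getElem?_eq_none (by omega)
      rw [h1, h2]
      rfl
  · have h1 : (List.range h)[y]? = none := List.getElem?_eq_none (by simpa using hy)
    have h2 : G[y]? = none := List.getElem?_eq_none (by omega)
    rw [h1, h2]
    rfl

theorem next_grid_spec : Claim_equal_next_grid := by
  intro grid cube round _ _
  unfold Spec_next_grid next_grid next_grid_alt
  exact (ngMain cube round (grid.headD []).length grid.length).symm
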